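-- pv_equiv track=rewrite | github.com/skyicechuchu/adventofcode2024 | day14.py | count_horizontal_adjacencies
-- ===== SOURCE A (Python) =====
-- def count_horizontal_adjacencies(positions, width, height):
--     adjacencies = 0
--     pos_set = set(positions)
--     for y in range(height):
--         for x in range(width - 1):
--             if (x, y) in pos_set and (x + 1, y) in pos_set:
--                 adjacencies += 1
--     return adjacencies
-- ===== SOURCE B (Python) =====
-- def count_horizontal_adjacencies(positions, width, height):
--     occupied = set(positions)
--     return sum(1 for (x, y) in occupied
--                if 0 <= x < width - 1 and 0 <= y < height and (x + 1, y) in occupied)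
-- ===== Notes on version B (the rewrite author's own statement) =====
-- stated objective: faster
-- what changed: B scans the deduplicated occupied cells once and counts those whose right neighbour is also occupied, instead of A's scan over every (x,y) cell of the width*height grid.
import Mathlib
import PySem

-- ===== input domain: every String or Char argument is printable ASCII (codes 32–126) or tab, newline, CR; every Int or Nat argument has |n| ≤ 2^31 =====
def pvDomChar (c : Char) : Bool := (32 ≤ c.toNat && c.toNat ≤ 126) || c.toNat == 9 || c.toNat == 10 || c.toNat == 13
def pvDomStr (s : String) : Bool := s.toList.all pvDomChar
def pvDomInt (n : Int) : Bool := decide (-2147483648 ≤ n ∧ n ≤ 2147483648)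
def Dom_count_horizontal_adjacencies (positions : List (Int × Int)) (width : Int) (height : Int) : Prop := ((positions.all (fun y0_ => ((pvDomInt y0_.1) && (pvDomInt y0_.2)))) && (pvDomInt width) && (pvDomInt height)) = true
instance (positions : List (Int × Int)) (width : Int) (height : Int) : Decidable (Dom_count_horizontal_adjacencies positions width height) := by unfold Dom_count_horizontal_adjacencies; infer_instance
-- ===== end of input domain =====

-- B counts horizontal adjacencies by a single pass over the deduplicated occupied cells
-- instead of A's scan over every cell of the width*height grid (objective: faster).


-- ===== PORT A =====
def count_horizontal_adjacencies (positions : List (Int × Int)) (width : Int) (height : Int) : Int :=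
  let pos_set : PySem.Set (Int × Int) := PySem.Set.ofList positions
  (PySem.List.pyRange 0 height).foldl (fun adjacencies y =>
    (PySem.List.pyRange 0 (width - 1)).foldl (fun adjacencies x =>
      if (x, y) ∈ pos_set ∧ (x + 1, y) ∈ pos_set then adjacencies + 1 else adjacencies)
      adjacencies) 0

-- ===== PORT B =====
def count_horizontal_adjacencies_alt (positions : List (Int × Int)) (width : Int) (height : Int) : Int :=
  let occupied : PySem.Set (Int × Int) := PySem.Set.ofList positions
  -- the Python sums over the set in hash order; the total is order-independent
  occupied.foldl (fun acc p =>
    if 0 ≤ p.1 ∧ p.1 < width - 1 ∧ 0 ≤ p.2 ∧ p.2 < height ∧ (p.1 + 1, p.2) ∈ occupied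
    then acc + 1 else acc) 0

-- ===== PRECONDITION & SPEC =====
def Spec_count_horizontal_adjacencies (positions : List (Int × Int)) (width : Int) (height : Int) (out : Int) : Prop := out = count_horizontal_adjacencies_alt positions width height
instance (positions : List (Int × Int)) (width : Int) (height : Int) (out : Int) : Decidable (Spec_count_horizontal_adjacencies positions width height out) := by unfold Spec_count_horizontal_adjacencies; infer_instance

-- ===== CLAIM (what is proved, stated in full; the proofs are below) =====
def Claim_equal_count_horizontal_adjacencies : Prop := ∀ (positions : List (Int × Int)) (width : Int) (height : Int), Dom_count_horizontal_adjacencies positions width height → Spec_count_horizontal_adjacencies positions width height (count_horizontal_adjacencies positions width height)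

-- ===== LEMMAS AND PROOFS =====

-- the in-bounds grid cells A enumerates (rows of x-values, flattened)
def pvGrid (width height : Int) : List (Int × Int) :=
  (PySem.List.pyRange 0 height).flatMap (fun y =>
    (PySem.List.pyRange 0 (width - 1)).map (fun x => (x, y)))

lemma pvGrid_nodup (width height : Int) : (pvGrid width height).Nodup := by
  unfold pvGrid
  rw [List.nodup_flatMap]
  constructor
  · intro y _
    exact (PySem.List.nodup_pyRange_one 0 (width - 1)).map (fun a b h => (Prod.ext_iff.mp h).1)
  · exact (PySem.List.nodup_pyRange_one 0 height).imp (fun {a b} hab => by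
      intro p hpa hpb
      simp only [List.mem_map] at hpa hpb
      obtain ⟨x1, _, rfl⟩ := hpa
      obtain ⟨x2, _, h2⟩ := hpb
      exact hab ((Prod.ext_iff.mp h2).2).symm)

lemma pvGrid_mem (width height : Int) (p : Int × Int) :
    p ∈ pvGrid width height ↔ 0 ≤ p.1 ∧ p.1 < width - 1 ∧ 0 ≤ p.2 ∧ p.2 < height := by
  unfold pvGrid
  simp only [List.mem_flatMap, List.mem_map, PySem.List.mem_pyRange_one]
  constructor
  · rintro ⟨y, hy, x, hx, rfl⟩; exact ⟨hx.1, hx.2, hy.1, hy.2⟩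
  · rintro ⟨h1, h2, h3, h4⟩; exact ⟨p.2, ⟨h3, h4⟩, p.1, ⟨h1, h2⟩, rfl⟩

-- two nodup lists count the same when each predicate forces membership in the other list
lemma countP_eq_of {α : Type} (L M : List α) (hL : L.Nodup) (hM : M.Nodup) (p q : α → Bool)
    (h1 : ∀ a ∈ L, p a → a ∈ M ∧ q a) (h2 : ∀ a ∈ M, q a → a ∈ L ∧ p a) :
    L.countP p = M.countP q := by
  rw [List.countP_eq_length_filter, List.countP_eq_length_filter]
  refine List.Perm.length_eq ?_
  rw [List.perm_ext_iff_of_nodup (hL.filter p) (hM.filter q)]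
  intro a
  simp only [List.mem_filter]
  constructor
  · rintro ⟨ha, hpa⟩; exact ⟨(h1 a ha hpa).1, (h1 a ha hpa).2⟩
  · rintro ⟨ha, hqa⟩; exact ⟨(h2 a ha hqa).1, (h2 a ha hqa).2⟩

lemma countP_key (positions : List (Int × Int)) (width height : Int) :
    (pvGrid width height).countP
        (fun p => decide ((p.1, p.2) ∈ PySem.Set.ofList positions ∧
                          (p.1 + 1, p.2) ∈ PySem.Set.ofList positions))
      = (PySem.Set.ofList positions).countP
        (fun p => decide (0 ≤ p.1 ∧ p.1 < width - 1 ∧ 0 ≤ p.2 ∧ p.2 < height ∧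
                          (p.1 + 1, p.2) ∈ PySem.Set.ofList positions)) := by
  apply countP_eq_of _ _ (pvGrid_nodup width height) (PySem.Set.nodup_ofList positions)
  · intro a ha hp
    rw [pvGrid_mem] at ha
    simp only [decide_eq_true_eq] at hp ⊢
    exact ⟨by simpa using hp.1, ha.1, ha.2.1, ha.2.2.1, ha.2.2.2, hp.2⟩
  · intro a ha hq
    simp only [decide_eq_true_eq] at hq ⊢
    exact ⟨(pvGrid_mem width height a).2 ⟨hq.1, hq.2.1, hq.2.2.1, hq.2.2.2.1⟩,
      by simpa using ha, hq.2.2.2.2⟩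

-- ===== VERDICT (by name: the statement is the Claim_ definition above) =====
theorem count_horizontal_adjacencies_spec : Claim_equal_count_horizontal_adjacencies := by
  intro positions width height _
  unfold Spec_count_horizontal_adjacencies count_horizontal_adjacencies count_horizontal_adjacencies_alt
  -- rewrite the Prop-conditioned ifs into Bool-conditioned ifs
  have hb : ∀ {C : Prop} [Decidable C] (a b : Int),
      (if C then a else b) = (if decide C = true then a else b) := by
    intro C _ a b; split_ifs with h1 h2 <;> simp_all
  calc
    (PySem.List.pyRange 0 height).foldl (fun adjacencies y =>
        (PySem.List.pyRange 0 (width - 1)).foldl (fun adjacencies x =>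
          if (x, y) ∈ PySem.Set.ofList positions ∧ (x + 1, y) ∈ PySem.Set.ofList positions
          then adjacencies + 1 else adjacencies) adjacencies) 0
      = (PySem.List.pyRange 0 height).foldl (fun adjacencies y =>
          adjacencies + ((PySem.List.pyRange 0 (width - 1)).countP
            (fun x => decide ((x, y) ∈ PySem.Set.ofList positions ∧
                              (x + 1, y) ∈ PySem.Set.ofList positions)) : Int)) 0 := by
        have hF : (fun (adjacencies : Int) y =>
            (PySem.List.pyRange 0 (width - 1)).foldl (fun adjacencies x =>
              if (x, y) ∈ PySem.Set.ofList positions ∧ (x + 1, y) ∈ PySem.Set.ofList positions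
              then adjacencies + 1 else adjacencies) adjacencies)
          = (fun (adjacencies : Int) y =>
            adjacencies + ((PySem.List.pyRange 0 (width - 1)).countP
              (fun x => decide ((x, y) ∈ PySem.Set.ofList positions ∧
                                (x + 1, y) ∈ PySem.Set.ofList positions)) : Int)) := by
          funext adjacencies y
          rw [← PySem.List.foldl_count_if]
          have : (fun (a : Int) x =>
              if (x, y) ∈ PySem.Set.ofList positions ∧ (x + 1, y) ∈ PySem.Set.ofList positions
              then a + 1 else a)
            = (fun (a : Int) x =>
              if (fun x => decide ((x, y) ∈ PySem.Set.ofList positions ∧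
                                   (x + 1, y) ∈ PySem.Set.ofList positions)) x = true
              then a + 1 else a) := by
            funext a x; exact hb _ _
          rw [this]
        rw [hF]
    _ = ((pvGrid width height).countP
          (fun p => decide ((p.1, p.2) ∈ PySem.Set.ofList positions ∧
                            (p.1 + 1, p.2) ∈ PySem.Set.ofList positions)) : Int) := by
        rw [PySem.List.foldl_add, zero_add]
        unfold pvGrid
        rw [List.countP_flatMap]
        push_cast
        rw [List.map_map]
        congr 1
        refine List.map_congr_left (fun y _ => ?_)
        simp [List.countP_map, Function.comp_def]
    _ = ((PySem.Set.ofList positions).countP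
          (fun p => decide (0 ≤ p.1 ∧ p.1 < width - 1 ∧ 0 ≤ p.2 ∧ p.2 < height ∧
                            (p.1 + 1, p.2) ∈ PySem.Set.ofList positions)) : Int) := by
        rw [countP_key]
    _ = (PySem.Set.ofList positions).foldl (fun acc p =>
          if 0 ≤ p.1 ∧ p.1 < width - 1 ∧ 0 ≤ p.2 ∧ p.2 < height ∧
             (p.1 + 1, p.2) ∈ PySem.Set.ofList positions
          then acc + 1 else acc) 0 := by
        have hG : (fun (acc : Int) (p : Int × Int) =>
            if 0 ≤ p.1 ∧ p.1 < width - 1 ∧ 0 ≤ p.2 ∧ p.2 < height ∧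
               (p.1 + 1, p.2) ∈ PySem.Set.ofList positions
            then acc + 1 else acc)
          = (fun (acc : Int) (p : Int × Int) =>
            if (fun p : Int × Int => decide (0 ≤ p.1 ∧ p.1 < width - 1 ∧ 0 ≤ p.2 ∧ p.2 < height ∧
               (p.1 + 1, p.2) ∈ PySem.Set.ofList positions)) p = true
            then acc + 1 else acc) := by
          funext acc p; exact hb _ _
        rw [hG, PySem.List.foldl_count_if, zero_add]
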